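-- pv_equiv track=rewrite | github.com/geminovc/model | first_order_model/shrink_util.py | convert_to_deletions_list
-- ===== SOURCE A (Python) =====
-- def convert_to_deletions_list(indices):
--     """
--     Convert list of indices to deletion list.
--
--     Example:
--     indices = [0, 1, 3, 5]
--     deletion_list = [(0, 1), (1,2), (3,4), (5,6)]
--
--     This is used when we get the indices of the unimportant columns, then convert into a deletion list.
--     Deletion list is the format we use for generally storing which indices to remove.
--     """
--
--     deletion_list = []
--     i = 0
--     indices = sorted(indices)
--     while i < len(indices):
--         old_i = i
--         while i < len(indices) - 1 and indices[i] + 1 == indices[i + 1]: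
--             i += 1
--         deletion_list.append((indices[old_i], indices[i] + 1))
--         i += 1
--     return deletion_list
-- ===== SOURCE B (Python) =====
-- def convert_to_deletions_list(indices):
--     s = sorted(indices)
--     starts = [v for k, v in enumerate(s) if k == 0 or s[k - 1] + 1 != v]
--     ends = [v + 1 for k, v in enumerate(s) if k == len(s) - 1 or v + 1 != s[k + 1]]
--     return list(zip(starts, ends))
-- ===== Notes on version B (the rewrite author's own statement) =====
-- stated objective: alternative
-- what changed: Replaced the nested while-loop run-merging walk with two independent boundary-detection passes over the sorted list (one collecting run starts where the previous element is not value-1, one collecting run ends where the next element is not value+1) zipped into pairs.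
import Mathlib
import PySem

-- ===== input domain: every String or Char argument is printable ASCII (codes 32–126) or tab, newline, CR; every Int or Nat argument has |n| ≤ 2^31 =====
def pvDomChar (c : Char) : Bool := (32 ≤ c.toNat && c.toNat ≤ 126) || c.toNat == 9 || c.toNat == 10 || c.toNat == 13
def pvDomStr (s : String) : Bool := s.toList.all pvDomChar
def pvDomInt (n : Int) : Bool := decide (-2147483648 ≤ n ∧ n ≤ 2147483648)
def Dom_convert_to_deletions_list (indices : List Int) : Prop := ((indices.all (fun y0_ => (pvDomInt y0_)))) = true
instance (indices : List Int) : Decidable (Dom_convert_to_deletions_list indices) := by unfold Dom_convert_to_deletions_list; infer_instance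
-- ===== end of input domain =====

-- B replaces A's nested while-loop run-merging walk with two independent boundary-detection
-- passes over the sorted list (run starts / run ends) zipped into pairs (objective: alternative; same cost).

-- ===== PORT A =====
-- inner `while i < len(indices) - 1 and indices[i] + 1 == indices[i + 1]: i += 1` (returns final i);
-- indices are always in range here, so `getD _ 0` is exactly Python's indices[i]
def pvAInner (s : List Int) (i : Nat) : Nat :=
  if i + 1 < s.length ∧ s.getD i 0 + 1 = s.getD (i + 1) 0 then pvAInner s (i + 1) else i
termination_by s.length - i
decreasing_by omega

-- needed only for the termination of the outer loop below
theorem pvAInner_ge (s : List Int) (i : Nat) : i ≤ pvAInner s i := by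
  rw [pvAInner]
  split
  · exact le_trans (by omega) (pvAInner_ge s (i + 1))
  · exact le_refl i
termination_by s.length - i
decreasing_by omega

-- outer `while i < len(indices): old_i = i; …inner…; append ((indices[old_i], indices[i] + 1)); i += 1`
def pvAOuter (s : List Int) (i : Nat) : List (Int × Int) :=
  if h : i < s.length then
    (s.getD i 0, s.getD (pvAInner s i) 0 + 1) :: pvAOuter s (pvAInner s i + 1)
  else []
termination_by s.length - i
decreasing_by have := pvAInner_ge s i; omega

def convert_to_deletions_list (indices : List Int) : List (Int × Int) :=
  pvAOuter (PySem.List.sorted indices id false) 0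

-- ===== PORT B =====
-- starts = [v for k, v in enumerate(s) if k == 0 or s[k-1] + 1 != v]
-- ends   = [v + 1 for k, v in enumerate(s) if k == len(s) - 1 or v + 1 != s[k+1]]
-- (s[k-1] / s[k+1] are only relevant when the first disjunct is false, so the index is in range
--  and pyGetD _ 0 is exactly Python's s[k-1] / s[k+1] there; the short-circuited branch is dead)
def convert_to_deletions_list_alt (indices : List Int) : List (Int × Int) :=
  let s := PySem.List.sorted indices id false
  let starts := (PySem.List.enumerate s 0).filterMap (fun kv =>
      if kv.1 = 0 ∨ PySem.List.pyGetD s (kv.1 - 1) 0 + 1 ≠ kv.2 then some kv.2 else none)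
  let ends := (PySem.List.enumerate s 0).filterMap (fun kv =>
      if kv.1 = (s.length : Int) - 1 ∨ kv.2 + 1 ≠ PySem.List.pyGetD s (kv.1 + 1) 0 then some (kv.2 + 1) else none)
  starts.zip ends

-- ===== PRECONDITION & SPEC =====
def Spec_convert_to_deletions_list (indices : List Int) (out : List (Int × Int)) : Prop := out = convert_to_deletions_list_alt indices
instance (indices : List Int) (out : List (Int × Int)) : Decidable (Spec_convert_to_deletions_list indices out) := by unfold Spec_convert_to_deletions_list; infer_instance

-- ===== CLAIM (what is proved, stated in full; the proofs are below) =====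
def Claim_equal_convert_to_deletions_list : Prop := ∀ (indices : List Int), Dom_convert_to_deletions_list indices → Spec_convert_to_deletions_list indices (convert_to_deletions_list indices)

-- ===== LEMMAS AND PROOFS =====

-- canonical run decomposition both ports compute, by adjacency on the sorted list:
-- run starts strictly after an element p / run ends (as end+1) of the list p :: rest
def pvGoS (p : Int) : List Int → List Int
  | [] => []
  | x :: xs => if p + 1 = x then pvGoS x xs else x :: pvGoS x xs

def pvGoE (p : Int) : List Int → List Int
  | [] => [p + 1]
  | x :: xs => if p + 1 = x then pvGoE x xs else (p + 1) :: pvGoE x xs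

-- extend the current run (first f, last l) along the list — A's merging walk, abstractly
def pvExt (f l : Int) : List Int → List (Int × Int)
  | [] => [(f, l + 1)]
  | y :: ys => if l + 1 = y then pvExt f y ys else (f, l + 1) :: pvExt y y ys

def pvRuns : List Int → List (Int × Int)
  | [] => []
  | x :: xs => pvExt x x xs

-- merging and boundary-zipping agree (purely adjacency, no sortedness needed)
theorem pvExt_eq_zip (rest : List Int) : ∀ f l : Int,
    pvExt f l rest = (f :: pvGoS l rest).zip (pvGoE l rest) := by
  induction rest with
  | nil => intro f l; simp [pvExt, pvGoS, pvGoE]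
  | cons y ys ih =>
    intro f l
    rw [pvExt, pvGoS, pvGoE]
    by_cases hc : l + 1 = y
    · rw [if_pos hc, if_pos hc, if_pos hc, ih]
    · rw [if_neg hc, if_neg hc, if_neg hc, ih, List.zip_cons_cons]

-- ===== A-side: the nested while loops compute pvRuns =====
theorem pvExt_aInner (s : List Int) (i : Nat) (f : Int) (hi : i < s.length) :
    pvExt f (s.getD i 0) (s.drop (i + 1)) =
      (f, s.getD (pvAInner s i) 0 + 1) :: pvRuns (s.drop (pvAInner s i + 1)) := by
  rw [pvAInner]
  by_cases hc : i + 1 < s.length ∧ s.getD i 0 + 1 = s.getD (i + 1) 0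
  · rw [if_pos hc]
    have hdrop : s.drop (i + 1) = s.getD (i + 1) 0 :: s.drop (i + 2) := by
      rw [List.getD_eq_getElem s 0 hc.1]; exact List.drop_eq_getElem_cons hc.1
    rw [hdrop, pvExt, if_pos hc.2]
    exact pvExt_aInner s (i + 1) f hc.1
  · rw [if_neg hc]
    by_cases h1 : i + 1 < s.length
    · have hne : s.getD i 0 + 1 ≠ s.getD (i + 1) 0 := fun h => hc ⟨h1, h⟩
      have hdrop : s.drop (i + 1) = s.getD (i + 1) 0 :: s.drop (i + 2) := by
        rw [List.getD_eq_getElem s 0 h1]; exact List.drop_eq_getElem_cons h1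
      rw [hdrop, pvExt, if_neg hne, pvRuns]
    · have : s.drop (i + 1) = [] := List.drop_eq_nil_of_le (by omega)
      rw [this, pvExt, pvRuns]
termination_by s.length - i
decreasing_by omega

theorem pvAOuter_eq_pvRuns (s : List Int) (i : Nat) :
    pvAOuter s i = pvRuns (s.drop i) := by
  rw [pvAOuter]
  by_cases hi : i < s.length
  · rw [dif_pos hi]
    have hdrop : s.drop i = s.getD i 0 :: s.drop (i + 1) := by
      rw [List.getD_eq_getElem s 0 hi]; exact List.drop_eq_getElem_cons hi
    rw [hdrop, pvRuns, pvExt_aInner s i _ hi]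
    exact congrArg _ (pvAOuter_eq_pvRuns s (pvAInner s i + 1))
  · rw [dif_neg hi, List.drop_eq_nil_of_le (by omega), pvRuns]
termination_by s.length - i
decreasing_by have := pvAInner_ge s i; omega

-- ===== B-side: the two boundary comprehensions compute pvGoS / pvGoE =====
def pvEndsAll : List Int → List Int
  | [] => []
  | x :: xs => pvGoE x xs

theorem pvStarts_eq (b : List Int) : ∀ (a : List Int) (p : Int), a.getLast? = some p →
    (PySem.List.enumerate b (a.length : Int)).filterMap
      (fun kv => if kv.1 = 0 ∨ PySem.List.pyGetD (a ++ b) (kv.1 - 1) 0 + 1 ≠ kv.2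
                 then some kv.2 else none)
    = pvGoS p b := by
  induction b with
  | nil => intro a p _; simp [PySem.List.enumerate_nil, pvGoS]
  | cons x xs ih =>
    intro a p hp
    obtain ⟨a', rfl⟩ := List.getLast?_eq_some_iff.mp hp
    rw [PySem.List.enumerate_cons, List.filterMap_cons]
    have hidx : (((a' ++ [p]).length : Int) - 1) = ((a'.length : Nat) : Int) := by simp
    have hget : PySem.List.pyGetD ((a' ++ [p]) ++ x :: xs) (((a' ++ [p]).length : Int) - 1) 0 = p := by
      rw [hidx, PySem.List.pyGetD_natCast, List.append_assoc]
      rw [List.getD_eq_getElem _ 0 (by simp)]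
      rw [List.getElem_append_right (le_refl a'.length)]
      simp
    have htail : (PySem.List.enumerate xs (((a' ++ [p]).length : Int) + 1)).filterMap
        (fun kv => if kv.1 = 0 ∨ PySem.List.pyGetD ((a' ++ [p]) ++ x :: xs) (kv.1 - 1) 0 + 1 ≠ kv.2
                   then some kv.2 else none) = pvGoS x xs := by
      have hcast : (((a' ++ [p]).length : Int) + 1) = ((((a' ++ [p]) ++ [x]).length : Nat) : Int) := by
        simp; omega
      have hlist : (a' ++ [p]) ++ x :: xs = ((a' ++ [p]) ++ [x]) ++ xs := by simp
      rw [hcast, hlist]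
      exact ih ((a' ++ [p]) ++ [x]) x (by simp)
    have hz : ¬ ((((a' ++ [p]).length : Nat) : Int) = 0) := by simp; omega
    rw [pvGoS]
    by_cases hc : p + 1 = x
    · have hno : ¬ ((((a' ++ [p]).length : Nat) : Int) = 0 ∨ PySem.List.pyGetD ((a' ++ [p]) ++ x :: xs) (((a' ++ [p]).length : Int) - 1) 0 + 1 ≠ x) := by
        rw [hget]; rintro (h | h); exact hz h; exact h hc
      rw [if_neg hno, if_pos hc, htail]
    · have hyes : ((((a' ++ [p]).length : Nat) : Int) = 0 ∨ PySem.List.pyGetD ((a' ++ [p]) ++ x :: xs) (((a' ++ [p]).length : Int) - 1) 0 + 1 ≠ x) := by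
        rw [hget]; exact Or.inr hc
      rw [if_pos hyes, if_neg hc, htail]

theorem pvEnds_eq (b : List Int) : ∀ (a : List Int),
    (PySem.List.enumerate b (a.length : Int)).filterMap
      (fun kv => if kv.1 = (((a ++ b).length : Nat) : Int) - 1 ∨ kv.2 + 1 ≠ PySem.List.pyGetD (a ++ b) (kv.1 + 1) 0
                 then some (kv.2 + 1) else none)
    = pvEndsAll b := by
  induction b with
  | nil => intro a; simp [PySem.List.enumerate_nil, pvEndsAll]
  | cons x xs ih =>
    intro a
    rw [PySem.List.enumerate_cons, List.filterMap_cons]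
    have htail : (PySem.List.enumerate xs ((a.length : Int) + 1)).filterMap
        (fun kv => if kv.1 = (((a ++ x :: xs).length : Nat) : Int) - 1 ∨ kv.2 + 1 ≠ PySem.List.pyGetD (a ++ x :: xs) (kv.1 + 1) 0
                   then some (kv.2 + 1) else none)
        = pvEndsAll xs := by
      have hcast : ((a.length : Int) + 1) = (((a ++ [x]).length : Nat) : Int) := by simp
      have hlist : a ++ x :: xs = (a ++ [x]) ++ xs := by simp
      rw [hcast, hlist]
      exact ih (a ++ [x])
    cases xs with
    | nil =>
      have hlast : ((a.length : Nat) : Int) = (((a ++ [x]).length : Nat) : Int) - 1 := by simp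
      rw [if_pos (Or.inl hlast)]
      rw [htail]
      simp [pvEndsAll, pvGoE]
    | cons y ys =>
      have hnl : ¬ (((a.length : Nat) : Int) = (((a ++ x :: y :: ys).length : Nat) : Int) - 1) := by
        simp; omega
      have hget : PySem.List.pyGetD (a ++ x :: y :: ys) ((a.length : Int) + 1) 0 = y := by
        have hcast : ((a.length : Int) + 1) = ((a.length + 1 : Nat) : Int) := by omega
        rw [hcast, PySem.List.pyGetD_natCast]
        rw [List.getD_eq_getElem _ 0 (by simp)]
        rw [List.getElem_append_right (by omega)]
        simp
      rw [htail]
      show _ = pvEndsAll (x :: y :: ys)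
      rw [pvEndsAll, pvEndsAll, pvGoE]
      by_cases hc : x + 1 = y
      · have hno : ¬ (((a.length : Nat) : Int) = (((a ++ x :: y :: ys).length : Nat) : Int) - 1 ∨ x + 1 ≠ PySem.List.pyGetD (a ++ x :: y :: ys) ((a.length : Int) + 1) 0) := by
          rw [hget]; rintro (h | h); exact hnl h; exact h hc
        rw [if_neg hno, if_pos hc]
      · have hyes : (((a.length : Nat) : Int) = (((a ++ x :: y :: ys).length : Nat) : Int) - 1 ∨ x + 1 ≠ PySem.List.pyGetD (a ++ x :: y :: ys) ((a.length : Int) + 1) 0) := by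
          rw [hget]; exact Or.inr hc
        rw [if_pos hyes, if_neg hc]

theorem pvAlt_eq_runs (s : List Int) :
    ((PySem.List.enumerate s 0).filterMap (fun kv =>
        if kv.1 = 0 ∨ PySem.List.pyGetD s (kv.1 - 1) 0 + 1 ≠ kv.2 then some kv.2 else none)).zip
      ((PySem.List.enumerate s 0).filterMap (fun kv =>
        if kv.1 = (s.length : Int) - 1 ∨ kv.2 + 1 ≠ PySem.List.pyGetD s (kv.1 + 1) 0 then some (kv.2 + 1) else none))
    = pvRuns s := by
  cases s with
  | nil => simp [PySem.List.enumerate_nil, pvRuns]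
  | cons x xs =>
    have hstarts : (PySem.List.enumerate (x :: xs) 0).filterMap (fun kv =>
        if kv.1 = 0 ∨ PySem.List.pyGetD (x :: xs) (kv.1 - 1) 0 + 1 ≠ kv.2 then some kv.2 else none)
        = x :: pvGoS x xs := by
      rw [PySem.List.enumerate_cons]
      rw [List.filterMap_cons]
      have hs := pvStarts_eq xs [x] x (by simp)
      norm_num at hs
      simp
      exact hs
    have hends : (PySem.List.enumerate (x :: xs) 0).filterMap (fun kv =>
        if kv.1 = ((x :: xs).length : Int) - 1 ∨ kv.2 + 1 ≠ PySem.List.pyGetD (x :: xs) (kv.1 + 1) 0 then some (kv.2 + 1) else none)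
        = pvGoE x xs := by
      have he := pvEnds_eq (x :: xs) []
      simp only [List.length_nil, Nat.cast_zero, List.nil_append, pvEndsAll] at he
      exact he
    rw [hstarts, hends, pvRuns, pvExt_eq_zip]

-- ===== VERDICT (by name: the statement is the Claim_ definition above) =====
theorem convert_to_deletions_list_spec : Claim_equal_convert_to_deletions_list := by
  intro indices _
  unfold Spec_convert_to_deletions_list convert_to_deletions_list convert_to_deletions_list_alt
  rw [pvAOuter_eq_pvRuns, List.drop_zero]
  exact (pvAlt_eq_runs (PySem.List.sorted indices id false)).symm
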